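-- pv_equiv track=rewrite | github.com/GhoutiYellesCH/python | PL/test2.py | chercher_variable_entrante
-- ===== SOURCE A (Python) =====
-- def chercher_variable_entrante(matrice):
--     min_val = 0
--     min_index = -1
--     for i in range(len(matrice[0]) - 1):
--         if matrice[0][i] < min_val:
--             min_val = matrice[0][i]
--             min_index = i
--     return min_index
-- ===== SOURCE B (Python) =====
-- def chercher_variable_entrante(matrice):
--     row = matrice[0][:-1]
--     if not row:
--         return -1
--     m = min(row)
--     return row.index(m) if m < 0 else -1
-- ===== Notes on version B (the rewrite author's own statement) =====
-- stated objective: simpler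
-- what changed: Replaces A's fused single scan maintaining (min_val, min_index) with a two-phase decomposition: slice off the last column, take min(row) in one builtin pass, then locate its first occurrence with row.index only when the minimum is negative.
import Mathlib
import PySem

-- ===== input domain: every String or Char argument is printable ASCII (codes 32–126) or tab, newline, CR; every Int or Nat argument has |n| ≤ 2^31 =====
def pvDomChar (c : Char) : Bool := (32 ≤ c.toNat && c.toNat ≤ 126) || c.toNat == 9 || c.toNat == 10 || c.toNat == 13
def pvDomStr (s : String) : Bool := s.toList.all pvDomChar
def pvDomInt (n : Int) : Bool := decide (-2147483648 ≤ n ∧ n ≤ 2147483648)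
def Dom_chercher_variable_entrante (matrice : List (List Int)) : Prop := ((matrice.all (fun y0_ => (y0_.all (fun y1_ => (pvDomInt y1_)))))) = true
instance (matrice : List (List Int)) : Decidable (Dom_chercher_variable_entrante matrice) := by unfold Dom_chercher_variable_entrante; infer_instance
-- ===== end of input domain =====

-- B replaces A's fused (min_val, min_index) scan with slice / min / index decomposition; objective: simpler.

-- ===== PORT A =====
def chercher_variable_entrante (matrice : List (List Int)) : Int :=
  let row := matrice.headD []
  (((PySem.List.pyRange 0 ((row.length : Int) - 1) 1).foldl
      (fun (s : Int × Int) i =>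
        if PySem.List.pyGetD row i 0 < s.1 then (PySem.List.pyGetD row i 0, i) else s)
      (0, -1))).2

-- ===== PORT B =====
def chercher_variable_entrante_alt (matrice : List (List Int)) : Int :=
  let row := PySem.List.slice (matrice.headD []) none (some (-1))
  if row.isEmpty then -1
  else
    match PySem.List.min? row (fun x => x) with
    | none => -1
    | some m => if m < 0 then (((PySem.List.index? row m).getD 0 : Nat) : Int) else -1

-- ===== PRECONDITION & SPEC =====
-- Pre_ excludes only the empty matrix, on which both Pythons raise IndexError at matrice[0].
def Pre_chercher_variable_entrante (matrice : List (List Int)) : Prop := matrice ≠ []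
instance (matrice : List (List Int)) : Decidable (Pre_chercher_variable_entrante matrice) := by unfold Pre_chercher_variable_entrante; infer_instance
def pvWitness_chercher_variable_entrante : List (List Int) := [[-3, 2, -5, 1]]
def Spec_chercher_variable_entrante (matrice : List (List Int)) (out : Int) : Prop := out = chercher_variable_entrante_alt matrice
instance (matrice : List (List Int)) (out : Int) : Decidable (Spec_chercher_variable_entrante matrice out) := by unfold Spec_chercher_variable_entrante; infer_instance

-- ===== CLAIM (what is proved, stated in full; the proofs are below) =====
def Claim_equal_chercher_variable_entrante : Prop := ∀ (matrice : List (List Int)), Dom_chercher_variable_entrante matrice → Pre_chercher_variable_entrante matrice → Spec_chercher_variable_entrante matrice (chercher_variable_entrante matrice)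

-- ===== LEMMAS AND PROOFS =====

-- B's body on a bare row (what chercher_variable_entrante_alt computes after the slice)
def pvAltRow (l : List Int) : Int :=
  match PySem.List.min? l (fun x => x) with
  | none => -1
  | some m => if m < 0 then (((PySem.List.index? l m).getD 0 : Nat) : Int) else -1

-- A's loop rephrased as a fold over the enumerated prefix
def pvLoop (l : List Int) : Int × Int :=
  (PySem.List.enumerate l 0).foldl
    (fun (s : Int × Int) (p : Int × Int) => if p.2 < s.1 then (p.2, p.1) else s) (0, -1)

theorem pv_foldl_min_shift (t : List Int) (a b : Int) :
    t.foldl min (min a b) = min a (t.foldl min b) := by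
  induction t generalizing b with
  | nil => rfl
  | cons c t ih =>
      simp only [List.foldl_cons, min_assoc, ih]

theorem pv_loop_spec (l : List Int) : pvLoop l = (l.foldl min 0, pvAltRow l) := by
  induction l using List.reverseRecOn with
  | nil => rfl
  | append_singleton l x ih =>
      rw [pvLoop, PySem.List.enumerate_append, List.foldl_append] at *
      rw [ih]
      simp only [PySem.List.enumerate, List.foldl_cons, List.foldl_nil, List.foldl_append]
      by_cases hx : x < l.foldl min 0
      · -- x strictly below everything seen (and below 0): new min, index = l.length
        have hx0 : x < 0 := lt_of_lt_of_le hx (PySem.List.foldl_min_le l 0).1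
        have hlt : ∀ y ∈ l, x < y := by
          intro y hy
          exact lt_of_lt_of_le hx (le_trans ((PySem.List.foldl_min_le l 0).2 y hy) le_rfl)
        have hnotmem : x ∉ l := fun h => lt_irrefl x (hlt x h)
        simp only [if_pos hx]
        -- RHS: compute min and altRow of l ++ [x]
        have hmin : (l ++ [x]).foldl min 0 = x := by
          rw [List.foldl_append]
          simp only [List.foldl_cons, List.foldl_nil]
          exact min_eq_right (le_of_lt hx)
        rw [Prod.mk.injEq]
        refine ⟨(min_eq_right (le_of_lt hx)).symm, ?_⟩
        -- altRow (l ++ [x]) = l.length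
        rw [zero_add]
        rw [pvAltRow]
        have hminq : PySem.List.min? (l ++ [x]) (fun y => y) = some x := by
          cases l with
          | nil => simp [PySem.List.min?_id_cons]
          | cons y t =>
              rw [List.cons_append, PySem.List.min?_id_cons]
              have : (t ++ [x]).foldl min y = x := by
                rw [List.foldl_append]
                simp only [List.foldl_cons, List.foldl_nil]
                refine min_eq_right (le_of_lt ?_)
                rcases PySem.List.foldl_min_mem t y with h | h
                · rw [h]; exact hlt y (List.mem_cons_self)
                · exact lt_of_lt_of_le hx
                    (le_trans ((PySem.List.foldl_min_le (y :: t) 0).2 _ (List.mem_cons_of_mem y h)) le_rfl)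
              rw [this]
        rw [hminq]
        simp only [if_pos hx0]
        have hidx := PySem.List.index?_append_singleton_self l x hnotmem
        simp only [PySem.List.index?_eq_idxOf?] at hidx
        simp [hidx]
      · -- min unchanged: state unchanged, and altRow unchanged
        have hge : l.foldl min 0 ≤ x := le_of_not_gt hx
        simp only [if_neg hx]
        have hmin : (l ++ [x]).foldl min 0 = l.foldl min 0 := by
          rw [List.foldl_append]
          simp only [List.foldl_cons, List.foldl_nil]
          exact min_eq_left hge
        rw [Prod.mk.injEq]
        refine ⟨(min_eq_left hge).symm, ?_⟩
        cases l with
        | nil =>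
            have hx0 : ¬ x < 0 := by simpa using hx
            simp [pvAltRow, PySem.List.min?_id_cons, hx0]
            rfl
        | cons y t =>
            have h0 : (y :: t).foldl min 0 = min 0 (t.foldl min y) := by
              simp only [List.foldl_cons]
              have := pv_foldl_min_shift t 0 y
              simpa using this
            set ml := t.foldl min y with hml
            by_cases hneg : ml < 0
            · -- real minimum negative: new element cannot beat it
              have hm0 : (y :: t).foldl min 0 = ml := by
                rw [h0]; exact min_eq_right (le_of_lt hneg)
              have hmlx : ml ≤ x := hm0 ▸ hge
              have hmem : ml ∈ y :: t := by
                rcases PySem.List.foldl_min_mem t y with h | h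
                · rw [hml, h]; exact List.mem_cons_self
                · exact List.mem_cons_of_mem y (hml ▸ h)
              rw [pvAltRow, pvAltRow, List.cons_append,
                  PySem.List.min?_id_cons, PySem.List.min?_id_cons]
              have : (t ++ [x]).foldl min y = ml := by
                rw [List.foldl_append]
                simp only [List.foldl_cons, List.foldl_nil]
                exact min_eq_left hmlx
              have hidx := PySem.List.index?_append_of_mem [x] hmem
              rw [List.cons_append] at hidx
              simp only [PySem.List.index?_eq_idxOf?] at hidx
              rw [this, ← hml]
              simp [hneg, hidx]
            · -- real minimum nonnegative: both sides -1
              have hml0 : 0 ≤ ml := le_of_not_gt hneg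
              have hm0 : (y :: t).foldl min 0 = 0 := by
                rw [h0]; exact min_eq_left hml0
              have hx0 : 0 ≤ x := hm0 ▸ hge
              have hnn : ¬ min ml x < 0 := not_lt.mpr (le_min hml0 hx0)
              rw [pvAltRow, pvAltRow, List.cons_append,
                  PySem.List.min?_id_cons, PySem.List.min?_id_cons]
              have : (t ++ [x]).foldl min y = min ml x := by
                rw [List.foldl_append]; simp [hml]
              rw [this]
              simp [hnn]
              exact hml0

-- A's pyRange/pyGetD fold over row equals the enumerate fold over row.dropLast
theorem pv_A_eq_loop (row : List Int) :
    (((PySem.List.pyRange 0 ((row.length : Int) - 1) 1).foldl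
        (fun (s : Int × Int) i =>
          if PySem.List.pyGetD row i 0 < s.1 then (PySem.List.pyGetD row i 0, i) else s)
        (0, -1))).2 = (pvLoop row.dropLast).2 := by
  rw [pvLoop, PySem.List.enumerate_eq_map_pyRange (d := 0), List.foldl_map]
  rcases Nat.eq_zero_or_pos row.length with h0 | hpos
  · rw [List.eq_nil_of_length_eq_zero h0]; rfl
  · have hlen : (row.dropLast.length : Int) = (row.length : Int) - 1 := by
      rw [List.length_dropLast]; omega
    rw [PySem.List.len_eq, hlen]
    congr 1
    apply PySem.List.foldl_congr_mem
    intro s i hi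
    have hi' := (PySem.List.mem_pyRange_one).1 hi
    have h0 : 0 ≤ i := hi'.1
    have hlt : i < (row.dropLast.length : Int) := by
      rw [List.length_dropLast]; omega
    have hlt' : i < (row.length : Int) := by omega
    rw [PySem.List.pyGetD_eq_getElem row 0 h0 hlt',
        PySem.List.pyGetD_eq_getElem row.dropLast 0 h0 hlt,
        List.getElem_dropLast]

theorem pv_alt_eq (matrice : List (List Int)) :
    chercher_variable_entrante_alt matrice = pvAltRow (matrice.headD []).dropLast := by
  rw [chercher_variable_entrante_alt]
  simp only [PySem.List.slice_to_neg_one]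
  set l := (matrice.headD []).dropLast with hl
  by_cases he : l.isEmpty
  · rw [if_pos he]
    rw [List.isEmpty_iff] at he
    rw [he]; rfl
  · rw [if_neg he, pvAltRow]

-- ===== VERDICT (by name: the statement is the Claim_ definition above) =====
theorem chercher_variable_entrante_spec : Claim_equal_chercher_variable_entrante := by
  intro matrice _ _
  unfold Spec_chercher_variable_entrante
  rw [chercher_variable_entrante, pv_A_eq_loop, pv_loop_spec, pv_alt_eq]
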